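/- GENERATED by mk_final_copies.py from the proof of the farm's unit `start_decoder.C8c` (farm:start_decoder.C8c.1: Lemmas.lean) as the
   re-elaboration sweep compiled it — do not edit. -/
import Asan.CheckWalk
import Vorbis.Spec.Units.start_decoder_C8c
import Vorbis.Spec.StartDecoderCarry
import Vorbis.Spec.StartDecoderC3

open X86 X86.User Asan Vorbis Vorbis.Spec Vorbis.Spec.StartDecoder

set_option maxRecDepth 100000
set_option maxHeartbeats 4000000

namespace Vorbis.Spec.start_decoder_C8c

/-- **The fields of the struct at `c` other than `sorted_values`** (`[c + 2104, c + 2112)`) read the same in `m'` as in `m`: what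
survives the store `c->sorted_values = p` of line 3857 (0x114a56). (`BookFields` of the carry layer contains `sorted_values`.) -/
structure FieldsBut (m m' : Mem) (c : Nat) : Prop where
  dimensions : Codebook.dimensions m' c = Codebook.dimensions m c
  entries : Codebook.entries m' c = Codebook.entries m c
  codeword_lengths : Codebook.codeword_lengths m' c = Codebook.codeword_lengths m c
  lookup_type : Codebook.lookup_type m' c = Codebook.lookup_type m c
  sparse : Codebook.sparse m' c = Codebook.sparse m c
  lookup_values : Codebook.lookup_values m' c = Codebook.lookup_values m c
  multiplicands : Codebook.multiplicands m' c = Codebook.multiplicands m c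
  codewords : Codebook.codewords m' c = Codebook.codewords m c
  sorted_codewords : Codebook.sorted_codewords m' c = Codebook.sorted_codewords m c
  sorted_entries : Codebook.sorted_entries m' c = Codebook.sorted_entries m c

/-- The fields from the two kept parts of the struct, below and above the word `sorted_values`. -/
theorem FieldsBut.of_eqOn {m m' : Mem} {c : Nat} (hc : c + 2120 ≤ 2 ^ 64) (b1 : Mem.EqOn c (c + 2104) m m')
    (b2 : Mem.EqOn (c + 2112) (c + 2120) m m') : FieldsBut m m' c := by
  constructor
  · simp only [vacc, voff]
    exact b1.i32 _ (by omega) (by omega) (by omega)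
  · simp only [vacc, voff]
    exact b1.i32 _ (by omega) (by omega) (by omega)
  · simp only [vacc, voff]
    exact b1.u64 _ (by omega) (by omega) (by omega)
  · simp only [vacc, voff]
    exact b1.u8 _ (by omega) (by omega) (by omega)
  · simp only [vacc, voff]
    exact b1.u8 _ (by omega) (by omega) (by omega)
  · simp only [vacc, voff]
    exact b1.u32 _ (by omega) (by omega) (by omega)
  · simp only [vacc, voff]
    exact b1.u64 _ (by omega) (by omega) (by omega)
  · simp only [vacc, voff]
    exact b1.u64 _ (by omega) (by omega) (by omega)
  · simp only [vacc, voff]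
    exact b1.u64 _ (by omega) (by omega) (by omega)
  · simp only [vacc, voff]
    exact b2.i32 _ (by omega) (by omega) (by omega)

/-- **`Core8` over a change of memory that keeps every field of the struct `cb(i)` but `sorted_values` and the bytes of the
`lengths` array**, for a state with CUR(i), the same `cb(i)`, the same rbx and r12. `Core8` reads neither `sorted_values` nor the
contents of any table but `lengths` (L(E), CNT / CNT′). -/
theorem core_move {g : Ghost} {i : Nat} {A2 A3 Ai Aw Ab : Arena} {A : Arena × List Obj} {lengths values : Nat} {v w : State}
    (h : Core8 g i A2 A3 Ai Aw Ab A lengths values v) (hcur : Cur g i A2 A3 Ai A w)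
    (ecb : g.cb w.mem i = g.cb v.mem i) (e : FieldsBut v.mem w.mem (g.cb v.mem i))
    (hlen : (Block.mk lengths (Codebook.entries v.mem (g.cb v.mem i)).toNat).Kept v.mem w.mem)
    (rbx : w.reg .rbx = v.reg .rbx) (r12 : w.reg .r12 = v.reg .r12) :
    Core8 g i A2 A3 Ai Aw Ab A lengths values w := by
  have hlenE := hlen.same
  have hlenI := hlen.inside
  simp only [vblock] at hlenE hlenI
  have eused : usedCount w.mem lengths (Codebook.entries v.mem (g.cb v.mem i)).toNat =
      usedCount v.mem lengths (Codebook.entries v.mem (g.cb v.mem i)).toNat := C7.usedCount_same hlenE hlenI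
  have elong : longCount w.mem lengths (Codebook.entries v.mem (g.cb v.mem i)).toNat =
      longCount v.mem lengths (Codebook.entries v.mem (g.cb v.mem i)).toNat := C7.longCount_same hlenE hlenI
  refine
    { cur := hcur
      extw := h.extw
      extb := h.extb
      extb' := h.extb'
      k1 := ?_
      k2 := ?_
      rbx := ?_
      r12 := ?_
      lenL := ?_
      dense_values := ?_
      dense_lengths := ?_
      dense_codewords := ?_
      dense_eq := ?_
      dense_temps := ?_
      dense_cnt := ?_
      sparse_lengths := ?_
      sparse_temps := ?_
      sparse_cnt := ?_
      fresh := ?_ }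
  · rw [ecb]
    refine ⟨?_, ?_, ?_, ?_⟩
    · rw [e.dimensions]
      exact h.k1.dim_pos
    · rw [e.dimensions]
      exact h.k1.dim_le
    · rw [e.entries]
      exact h.k1.ent_nonneg
    · rw [e.entries]
      exact h.k1.ent_lt
  · rw [ecb]
    refine ⟨?_, ?_, ?_, ?_, ?_⟩
    · rw [e.sparse]
      exact h.k2.sparse_01
    · rw [e.sorted_entries]
      exact h.k2.se_nonneg
    · rw [e.sorted_entries, e.entries]
      exact h.k2.se_le
    · rw [e.sparse, e.sorted_entries]
      exact h.k2.sparse_pos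
    · rw [e.sparse, e.sorted_entries, e.entries]
      exact h.k2.sparse_quarter
  · rw [rbx]
    exact h.rbx
  · rw [r12]
    exact h.r12
  · rw [ecb, e.entries]
    exact h.lenL.same hlenE hlenI
  · rw [ecb, e.sparse]
    exact h.dense_values
  · rw [ecb, e.sparse, e.codeword_lengths, e.entries]
    exact h.dense_lengths
  · rw [ecb, e.sparse, e.codewords, e.entries]
    exact h.dense_codewords
  · rw [ecb, e.sparse, e.codeword_lengths]
    exact h.dense_eq
  · rw [ecb, e.sparse]
    exact h.dense_temps
  · rw [ecb, e.sparse]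
    intro hs
    have := h.dense_cnt hs
    unfold CNT' at this ⊢
    rw [e.entries, e.sorted_entries, elong]
    exact this
  · rw [ecb, e.sparse, e.codeword_lengths, e.sorted_entries]
    exact h.sparse_lengths
  · rw [ecb, e.sparse, e.codewords, e.sorted_entries, e.entries]
    exact h.sparse_temps
  · rw [ecb, e.sparse]
    intro hs
    have := h.sparse_cnt hs
    unfold CNT at this ⊢
    rw [e.entries, e.sorted_entries, eused]
    exact this
  · rw [ecb]
    refine ⟨?_, ?_, ?_⟩
    · rw [e.lookup_type]
      exact h.fresh.lookup_type
    · rw [e.lookup_values]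
      exact h.fresh.lookup_values
    · rw [e.multiplicands]
      exact h.fresh.multiplicands

/-- **A temp block of the arena lies inside the arena's buffer, off the struct `cb(i)` and off every setup block** (the free gap lies
between the setup end and the temp end; the struct is inside the codebooks block, a setup block): the `lengths` and `values`
arrays of a sparse book against the windows of this segment. -/
theorem temp_where {g : Ghost} {i : Nat} {A2 A3 Ai : Arena} {A : Arena × List Obj} {m : Mem}
    (hm : MInv g i A2 A3 Ai A m) {p n : Nat} (ht : A.1.TBlock p n) :
    (A.1.B ≤ p ∧ p + n ≤ A.1.B + A.1.L) ∧ (p + n ≤ g.cb m i ∨ g.cb m i + 2120 ≤ p) ∧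
      ∀ C, A.1.Blk C → p + n ≤ C.base ∨ C.base + C.size ≤ p := by
  have ha : ArenaOK A.1 A.2 m g.f := hm.sd.arena
  have hr := ha.tblock_range ht
  have hb := ha.bounds
  have hl := le_r8 n
  have hcbOK := hm.ages.cbOK
  have hcbA : A.1.Blk (codebooksBlock m g.f) := hcbOK.F2.mono hm.ages.exti
  have hci := hcbOK.cb_in i hm.lt
  have hd := ha.blk_tblock_disjoint hcbA ht
  refine ⟨?_, ?_, ?_⟩
  · omega
  · unfold Ghost.cb
    simp only [vblock, voff] at hci hd
    omega
  · intro C hC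
    have hdC := ha.blk_tblock_disjoint hC ht
    simp only [vblock] at hdC
    omega

/-- **Where the `lengths` array is** (dense: the `codeword_lengths` block, allocated between `Ai` and `Aw`; sparse: the temp block
P1): inside the arena's buffer, off the struct `cb(i)`. -/
theorem lengths_where {g : Ghost} {i : Nat} {A2 A3 Ai Aw Ab : Arena} {A : Arena × List Obj} {lengths values : Nat} {v : State}
    (h : Core8 g i A2 A3 Ai Aw Ab A lengths values v) (hm : MInv g i A2 A3 Ai A v.mem) :
    (A.1.B ≤ lengths ∧ lengths + (Codebook.entries v.mem (g.cb v.mem i)).toNat ≤ A.1.B + A.1.L) ∧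
      (lengths + (Codebook.entries v.mem (g.cb v.mem i)).toNat ≤ g.cb v.mem i ∨ g.cb v.mem i + 2120 ≤ lengths) := by
  rcases h.k2.sparse_01 with h0 | h1
  · have hB := (h.dense_lengths h0).mono (C8.core_extw' h)
    rw [← h.dense_eq h0] at hB
    have hk := young_off_book hm hB
    simp only [] at hk
    exact hk
  · have ht := (h.sparse_temps h1).tblock (p := lengths) (n := (Codebook.entries v.mem (g.cb v.mem i)).toNat)
      (List.mem_cons_of_mem _ (List.mem_cons_of_mem _ List.mem_cons_self))
    obtain ⟨k1, k2, _⟩ := temp_where hm ht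
    exact ⟨k1, k2⟩

/-- **The `lengths` array is off a block allocated since `Ac`** (the `sorted_values` block the FIX 7 memset fills): dense, two
consecutive periods; sparse, a temp block against a setup block. -/
theorem lengths_off_new {g : Ghost} {i : Nat} {A2 A3 Ai Aw Ab Ac : Arena} {A : Arena × List Obj} {lengths values : Nat}
    {v : State} (h : Core8 g i A2 A3 Ai Aw Ab A lengths values v) (hm : MInv g i A2 A3 Ai A v.mem)
    (hextc : Ab.Extends Ac) (hextc' : Ac.Extends A.1) {C : Block} (hC : Since Ac A.1 C) :
    lengths + (Codebook.entries v.mem (g.cb v.mem i)).toNat ≤ C.base ∨ C.base + C.size ≤ lengths := by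
  rcases h.k2.sparse_01 with h0 | h1
  · have hB := (h.dense_lengths h0).mono (h.extb.trans hextc)
    rw [← h.dense_eq h0] at hB
    have hd := hm.sd.arena.since_disjoint_since hextc' hB hC
    simp only [vblock] at hd
    omega
  · have ht := (h.sparse_temps h1).tblock (p := lengths) (n := (Codebook.entries v.mem (g.cb v.mem i)).toNat)
      (List.mem_cons_of_mem _ (List.mem_cons_of_mem _ List.mem_cons_self))
    obtain ⟨_, _, k3⟩ := temp_where hm ht
    exact k3 C hC.1

/-- **Where the `values` array of a sparse book is** (the temp block P3 of `4·SE` bytes): inside the arena's buffer, off the struct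
`cb(i)`, off every setup block. -/
theorem values_where {g : Ghost} {i : Nat} {A2 A3 Ai Aw Ab : Arena} {A : Arena × List Obj} {lengths values : Nat} {v : State}
    (h : Core8 g i A2 A3 Ai Aw Ab A lengths values v) (hm : MInv g i A2 A3 Ai A v.mem)
    (h1 : Codebook.sparse v.mem (g.cb v.mem i) = 1) :
    (A.1.B ≤ values ∧ values + 4 * (Codebook.sorted_entries v.mem (g.cb v.mem i)).toNat ≤ A.1.B + A.1.L) ∧
      (values + 4 * (Codebook.sorted_entries v.mem (g.cb v.mem i)).toNat ≤ g.cb v.mem i ∨ g.cb v.mem i + 2120 ≤ values) ∧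
      ∀ C, A.1.Blk C → values + 4 * (Codebook.sorted_entries v.mem (g.cb v.mem i)).toNat ≤ C.base ∨ C.base + C.size ≤ values := by
  have ht := (h.sparse_temps h1).tblock (p := values) (n := 4 * (Codebook.sorted_entries v.mem (g.cb v.mem i)).toNat)
    List.mem_cons_self
  exact temp_where hm ht

/-- **THE EXIT AT cut140 (0x114a8c, the FIX 7 memset returned), pure**: from `In8M` at cut139 and ONE footprint from the cut to the
returned state — the stack below `R` (three pushed return addresses, memset's frame), the word `c->sorted_values`, the new block
`[b, b + 4·(SE+1))` (allocated since `Ac`: a `Young` window) — with the stored pointer `b` and memset's zero fill: `At8M3`.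
`MInv.step` carries `Frame` + CUR(i); `core_move` the book under construction; VAL by the place of the temp block P3. -/
theorem build_m3 {u₀ : State} {g : Ghost} {i : Nat} {A2 A3 Ai Aw Ab Ac : Arena} {A : Arena × List Obj}
    {lengths values b : Nat} {v w : State}
    (h : In8M u₀ g i A2 A3 Ai Aw Ab A lengths values L.start_decoder.cut139 v)
    (hextc : Ab.Extends Ac) (hextc' : Ac.Extends A.1)
    (hsc : Since Ab Ac ⟨Codebook.sorted_codewords v.mem (g.cb v.mem i),
      4 * ((Codebook.sorted_entries v.mem (g.cb v.mem i)).toNat + 1)⟩)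
    (hsv : Since Ac A.1 ⟨b, 4 * ((Codebook.sorted_entries v.mem (g.cb v.mem i)).toNat + 1)⟩)
    (hrip : w.rip = L.start_decoder.cut140) (hrsp : w.reg .rsp = addr g.R) (hcode : CodeOK u₀ w.mem) (hinv : abiInv w)
    (r14 : w.reg .r14 = v.reg .r14) (rbx : w.reg .rbx = v.reg .rbx) (r12 : w.reg .r12 = v.reg .r12)
    (hall : Mem.SameExcept [⟨g.R - 408, g.R⟩, ⟨g.cb v.mem i + 2104, g.cb v.mem i + 2112⟩,
      ⟨b, b + 4 * ((Codebook.sorted_entries v.mem (g.cb v.mem i)).toNat + 1)⟩] v.mem w.mem)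
    (hun : ShadowUntouched v.mem w.mem)
    (hfield : w.mem.u64 (g.cb v.mem i + 2104) = b)
    (hzero : ZeroFill w.mem b (4 * ((Codebook.sorted_entries v.mem (g.cb v.mem i)).toNat + 1))) :
    At8M3 u₀ g i w := by
  have hfr := h.frame
  have hcur := h.core.cur
  have hpos : Pos g A := Pos.of hfr hcur
  have hm0 : MInv g i A2 A3 Ai A v.mem := MInv.of hfr hcur
  have hcw := hm0.c_where
  have hlw := lengths_where h.core hm0
  have hln := lengths_off_new h.core hm0 hextc hextc' hsv
  have hvw := values_where h.core hm0
  have hval := h.sparse_val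
  have hse := h.se_pos
  have hr14 := hcur.r14
  have hextAiAc : Ai.Extends Ac := (h.core.extw.trans h.core.extb).trans hextc
  have hsvi : Since Ai A.1 ⟨b, 4 * ((Codebook.sorted_entries v.mem (g.cb v.mem i)).toNat + 1)⟩ := hsv.older hextAiAc
  have hyo := young_off_book hm0 hsvi
  simp only [] at hyo hln
  obtain ⟨c, hc⟩ : ∃ c, g.cb v.mem i = c := ⟨_, rfl⟩
  rw [hc] at hcw hlw hln hvw hval hse hr14 hsvi hyo hall hfield hzero hsv hsc
  obtain ⟨n, hn⟩ : ∃ n, 4 * ((Codebook.sorted_entries v.mem c).toNat + 1) = n := ⟨_, rfl⟩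
  rw [hn] at hsvi hyo hall hzero hsv hln
  obtain ⟨p1, p2, p3, p4, p5, p6, p7, p8, p9, p10, p11, p12, p13, p14⟩ := hpos
  have hpos : Pos g A := ⟨p1, p2, p3, p4, p5, p6, p7, p8, p9, p10, p11, p12, p13, p14⟩
  -- the three windows are windows of a step
  have hok : ∀ x, x ∈ [(⟨g.R - 408, g.R⟩ : Span), ⟨c + 2104, c + 2112⟩, ⟨b, b + n⟩] → OkWin g Ai A c x := by
    intro x hx
    simp only [List.mem_cons, List.mem_nil_iff, or_false] at hx
    rcases hx with rfl | rfl | rfl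
    · apply OkWin0.ok
      left
      simp only []
      omega
    · apply OkWin0.ok
      right
      right
      right
      left
      simp only []
      omega
    · right
      refine ⟨?_, ?_, ?_⟩
      · simp only []
        omega
      · simp only []
        omega
      · intro B hB
        have hd := hm0.sd.arena.old_disjoint_since hm0.ages.exti hB hsvi
        simp only [vblock] at hd ⊢
        omega
  have hb : Bits (g.Blk A) g.len w.mem g.f := by
    apply bits_kept hpos hm0.sd.bits hall
    intro x hx
    simp only [List.mem_cons, List.mem_nil_iff, or_false] at hx
    rcases hx with rfl | rfl | rfl
    · left
      simp only []
      omega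
    · right
      left
      simp only []
      omega
    · right
      left
      simp only []
      omega
  obtain ⟨hm2, hcb2⟩ := hm0.step hpos hc hall hun hok hb
  -- the struct but the stored word
  have hf : FieldsBut v.mem w.mem c := by
    apply FieldsBut.of_eqOn (by omega)
    · apply hall.eqOn
      intro x hx
      simp only [List.mem_cons, List.mem_nil_iff, or_false] at hx
      rcases hx with rfl | rfl | rfl
      · simp only []
        omega
      · simp only []
        omega
      · simp only []
        omega
    · apply hall.eqOn
      intro x hx
      simp only [List.mem_cons, List.mem_nil_iff, or_false] at hx
      rcases hx with rfl | rfl | rfl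
      · simp only []
        omega
      · simp only []
        omega
      · simp only []
        omega
  -- the `lengths` array
  have hlen : (Block.mk lengths (Codebook.entries v.mem c).toNat).Kept v.mem w.mem := by
    apply Block.Kept.of_sameExcept hall
    · intro x hx
      simp only [List.mem_cons, List.mem_nil_iff, or_false] at hx
      rcases hx with rfl | rfl | rfl
      · simp only []
        omega
      · simp only []
        omega
      · simp only []
        omega
    · simp only []
      omega
  have ecb : g.cb w.mem i = g.cb v.mem i := hcb2.trans hc.symm
  have hcur' : Cur g i A2 A3 Ai A w := by
    apply hm2.cur hcur.hand
    rw [hcb2, r14]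
    exact hr14
  have hcore' : Core8 g i A2 A3 Ai Aw Ab A lengths values w := by
    apply core_move h.core hcur' ecb _ _ rbx r12
    · rw [hc]
      exact hf
    · rw [hc]
      exact hlen
  have hfr' : Frame u₀ g L.start_decoder.cut140 A w := hm2.frame hfr hrip hrsp hcode hinv hfr.offText hfr.ext
  have esv : Codebook.sorted_values w.mem c = b := by
    simp only [vacc, voff]
    exact hfield
  refine ⟨A, lengths, values, A2, A3, Ai, Aw, Ab, Ac, ⟨hfr', hcore', ?_, ?_⟩, hextc, hextc', ?_, ?_, ?_⟩
  · -- VAL: the temp block P3 is off the three windows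
    rw [hcb2, hf.sparse, hf.sorted_entries, hf.entries]
    intro h1
    obtain ⟨k1, k2, k3⟩ := hvw h1
    have k4 := k3 _ hsv.1
    simp only [] at k4
    apply (hval h1).same
    · apply hall.eqOn
      intro x hx
      simp only [List.mem_cons, List.mem_nil_iff, or_false] at hx
      rcases hx with rfl | rfl | rfl
      · simp only []
        omega
      · simp only []
        omega
      · simp only []
        omega
    · omega
  · rw [hcb2, hf.sorted_entries]
    exact hse
  · rw [hcb2, hf.sorted_codewords, hf.sorted_entries]
    exact hsc
  · rw [hcb2, esv, hf.sorted_entries, hn]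
    exact hsv
  · rw [hcb2, esv, hf.sorted_entries, hn]
    exact hzero

/-- **THE EXIT AT cut4 (0x113b22, `error(f, VORBIS_outofmem)` returned 0), pure**: from `In8M` at cut139 and ONE footprint from the
cut to the state at the epilogue — the stack below `R`, the word `c->sorted_values` (NULL stored), `f->error` — : `AtERR` with
SD.ERR (`Cur.failed`: the setup blocks stay live, the temp blocks of a sparse book are left allocated). -/
theorem build_err {u₀ : State} {g : Ghost} {i : Nat} {A2 A3 Ai Aw Ab : Arena} {A : Arena × List Obj}
    {lengths values : Nat} {v w : State}
    (h : In8M u₀ g i A2 A3 Ai Aw Ab A lengths values L.start_decoder.cut139 v)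
    (hrip : w.rip = L.start_decoder.cut4) (hrsp : w.reg .rsp = addr g.R) (hcode : CodeOK u₀ w.mem) (hinv : abiInv w)
    (r14 : w.reg .r14 = v.reg .r14)
    (hall : Mem.SameExcept [⟨g.R - 408, g.R⟩, ⟨g.cb v.mem i + 2104, g.cb v.mem i + 2112⟩,
      ⟨g.f + 140, g.f + 144⟩] v.mem w.mem)
    (hun : ShadowUntouched v.mem w.mem) (hrax : (w.reg .rax).toNat % 2 ^ 32 = 0) : AtERR u₀ g w := by
  have hfr := h.frame
  have hcur := h.core.cur
  have hpos : Pos g A := Pos.of hfr hcur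
  have hm0 : MInv g i A2 A3 Ai A v.mem := MInv.of hfr hcur
  have hcw := hm0.c_where
  have hr14 := hcur.r14
  obtain ⟨c, hc⟩ : ∃ c, g.cb v.mem i = c := ⟨_, rfl⟩
  rw [hc] at hcw hr14 hall
  obtain ⟨p1, p2, p3, p4, p5, p6, p7, p8, p9, p10, p11, p12, p13, p14⟩ := hpos
  have hpos : Pos g A := ⟨p1, p2, p3, p4, p5, p6, p7, p8, p9, p10, p11, p12, p13, p14⟩
  have hok : ∀ x, x ∈ [(⟨g.R - 408, g.R⟩ : Span), ⟨c + 2104, c + 2112⟩, ⟨g.f + 140, g.f + 144⟩] → OkWin g Ai A c x := by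
    intro x hx
    simp only [List.mem_cons, List.mem_nil_iff, or_false] at hx
    apply OkWin0.ok
    unfold OkWin0
    rcases hx with rfl | rfl | rfl
    · simp only []
      omega
    · simp only []
      omega
    · simp only []
      omega
  have hb : Bits (g.Blk A) g.len w.mem g.f := by
    apply bits_kept hpos hm0.sd.bits hall
    intro x hx
    simp only [List.mem_cons, List.mem_nil_iff, or_false] at hx
    rcases hx with rfl | rfl | rfl
    · simp only []
      omega
    · simp only []
      omega
    · simp only []
      omega
  obtain ⟨hm2, hcb2⟩ := hm0.step hpos hc hall hun hok hb
  have hcur' : Cur g i A2 A3 Ai A w := by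
    apply hm2.cur hcur.hand
    rw [hcb2, r14]
    exact hr14
  have hfr' : Frame u₀ g pc_ERR A w := hm2.frame hfr hrip hrsp hcode hinv hfr.offText hfr.ext
  exact ⟨A, hfr', hcur.hand, Or.inl ⟨hrax, hcur'.failed⟩⟩

/-- **memset's size argument** (0x114a6e–0x114a7b: `mov eax,[r14+840H] ; lea edx,[rax+1] ; movsxd rdx,edx ; shl rdx,2`) for
`SE = n < 2^24`: `rdx = 4·(n + 1)`, no 32-bit wrap. -/
theorem rdx_size (n : Nat) (h : n < 2 ^ 24) :
    (Word.ofBV (BitVec.signExtend 64 (BitVec.setWidth 32 (Word.ofBV (BitVec.ofNat 32 n) + 1).toBitVec)) <<< 2).toNat =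
      4 * (n + 1) := by
  have e : BitVec.setWidth 32 (Word.ofBV (BitVec.ofNat 32 n) + 1).toBitVec = BitVec.ofNat 32 (n + 1) := by
    apply BitVec.eq_of_toNat_eq
    have e1 : (1 : UInt64).toNat = 1 := rfl
    rw [BitVec.toNat_setWidth, UInt64.toNat_toBitVec, UInt64.toNat_add, Vorbis.toNat_ofBV32, BitVec.toNat_ofNat,
      BitVec.toNat_ofNat, e1]
    omega
  rw [e]
  exact cnt32_sext_bv_shl2 (n + 1) (by omega)

end Vorbis.Spec.start_decoder_C8c
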